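-- pv_equiv track=rewrite | github.com/Gawesomer/advent_of_code | 2020/day_17/code.py | get_neighbours_indeces
-- ===== SOURCE A (Python) =====
-- def get_neighbours_indeces(coord):
--     """
--     return:
--         list([x, y, z]) for neighbours
--     """
--     res = []
--     x = coord[0]
--     y = coord[1]
--     z = coord[2]
--     if len(coord) == 4:
--         w = coord[3]
--     for x_i in [x-1, x, x+1]:
--         for y_i in [y-1, y, y+1]:
--             for z_i in [z-1, z, z+1]:
--                 if len(coord) == 4:
--                     for w_i in [w-1, w, w+1]:
--                         if not (x_i == x and y_i == y and z_i == z and w_i == w):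
--                             res.append((x_i, y_i, z_i, w_i))
--                 else:
--                         if not (x_i == x and y_i == y and z_i == z):
--                             res.append((x_i, y_i, z_i))
--     return res
-- ===== SOURCE B (Python) =====
-- def get_neighbours_indeces(coord):
--     dims = 4 if len(coord) == 4 else 3
--     center = tuple(coord[:dims])
--     offsets = [()]
--     for c in center:
--         offsets = [t + (d,) for t in offsets for d in (c - 1, c, c + 1)]
--     return [t for t in offsets if t != center]
-- ===== Notes on version B (the rewrite author's own statement) =====
-- stated objective: simpler
-- what changed: Replaces A's hardcoded 3D/4D nested loops with duplicated center-skip branches by one dimension-generic pass: an iterated cartesian product of per-coordinate delta lists, then filtering out the center tuple.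
import Mathlib
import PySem

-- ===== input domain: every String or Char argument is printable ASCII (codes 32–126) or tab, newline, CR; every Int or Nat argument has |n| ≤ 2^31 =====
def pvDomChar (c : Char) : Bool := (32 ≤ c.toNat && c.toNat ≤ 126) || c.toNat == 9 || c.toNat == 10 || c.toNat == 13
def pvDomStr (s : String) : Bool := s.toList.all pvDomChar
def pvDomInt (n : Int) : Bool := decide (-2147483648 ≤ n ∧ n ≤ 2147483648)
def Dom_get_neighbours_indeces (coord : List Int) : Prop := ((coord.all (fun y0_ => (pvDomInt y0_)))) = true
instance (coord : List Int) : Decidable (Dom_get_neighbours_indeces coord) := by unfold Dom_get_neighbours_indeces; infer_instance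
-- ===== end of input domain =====

-- B replaces A's hardcoded 3D/4D nested loops and duplicated branch by one dimension-generic
-- pass (iterated cartesian product of per-coordinate deltas, then drop the center) — simpler.

-- ===== PORT A =====
-- literal transliteration of A's nested loops; coord[i] is pyGetD (total under Pre_, which
-- guarantees the indices A reads are in range)
def get_neighbours_indeces (coord : List Int) : List (List Int) :=
  let x := PySem.List.pyGetD coord 0 0
  let y := PySem.List.pyGetD coord 1 0
  let z := PySem.List.pyGetD coord 2 0
  let w := PySem.List.pyGetD coord 3 0   -- bound only when len(coord) == 4, read only then too
  [x-1, x, x+1].foldl (fun res x_i =>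
    [y-1, y, y+1].foldl (fun res y_i =>
      [z-1, z, z+1].foldl (fun res z_i =>
        if coord.length = 4 then
          [w-1, w, w+1].foldl (fun res w_i =>
            if ¬(x_i = x ∧ y_i = y ∧ z_i = z ∧ w_i = w) then res ++ [[x_i, y_i, z_i, w_i]]
            else res) res
        else
          if ¬(x_i = x ∧ y_i = y ∧ z_i = z) then res ++ [[x_i, y_i, z_i]]
          else res) res) res) []

-- ===== PORT B =====
def get_neighbours_indeces_alt (coord : List Int) : List (List Int) :=
  let dims : Int := if coord.length = 4 then 4 else 3
  let center := PySem.List.slice coord (some 0) (some dims)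
  let offsets := center.foldl
    (fun ts c => ts.flatMap (fun t => [t ++ [c - 1], t ++ [c], t ++ [c + 1]])) [[]]
  offsets.filter (fun t => decide (t ≠ center))

-- ===== PRECONDITION & SPEC =====
-- Pre_ excludes exactly the inputs where A raises IndexError (fewer than 3 coordinates).
def Pre_get_neighbours_indeces (coord : List Int) : Prop := 3 ≤ coord.length
instance (coord : List Int) : Decidable (Pre_get_neighbours_indeces coord) := by unfold Pre_get_neighbours_indeces; infer_instance
def pvWitness_get_neighbours_indeces : List Int := [0, 1, 2]

def Spec_get_neighbours_indeces (coord : List Int) (out : List (List Int)) : Prop := out = get_neighbours_indeces_alt coord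
instance (coord : List Int) (out : List (List Int)) : Decidable (Spec_get_neighbours_indeces coord out) := by unfold Spec_get_neighbours_indeces; infer_instance

-- ===== CLAIM (what is proved, stated in full; the proofs are below) =====
def Claim_equal_get_neighbours_indeces : Prop := ∀ (coord : List Int), Dom_get_neighbours_indeces coord → Pre_get_neighbours_indeces coord → Spec_get_neighbours_indeces coord (get_neighbours_indeces coord)

-- ===== LEMMAS AND PROOFS =====

-- ===== VERDICT (by name: the statement is the Claim_ definition above) =====
set_option maxRecDepth 8192 in
theorem get_neighbours_indeces_spec : Claim_equal_get_neighbours_indeces := by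
  unfold Claim_equal_get_neighbours_indeces
  intro coord _ hpre
  unfold Spec_get_neighbours_indeces Pre_get_neighbours_indeces at *
  obtain ⟨x, y, z, rest, rfl⟩ : ∃ x y z rest, coord = x :: y :: z :: rest := by
    match coord, hpre with
    | x :: y :: z :: rest, _ => exact ⟨x, y, z, rest, rfl⟩
  by_cases h4 : rest.length = 1
  · obtain ⟨w, rfl⟩ := List.length_eq_one_iff.mp h4
    simp [get_neighbours_indeces, get_neighbours_indeces_alt, PySem.List.slice_toNat,
      PySem.List.pyGetD, List.foldl, List.filter, sub_eq_self, List.flatMap]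
  · have h4' : ¬ ((x :: y :: z :: rest).length = 4) := by simp; omega
    have g1 : PySem.List.pyGet? (x :: y :: z :: rest) 1 = some y := by
      rw [show (1 : Int) = ((1 : Nat) : Int) from rfl, PySem.List.pyGet?_natCast]; rfl
    have g2 : PySem.List.pyGet? (x :: y :: z :: rest) 2 = some z := by
      rw [show (2 : Int) = ((2 : Nat) : Int) from rfl, PySem.List.pyGet?_natCast]; rfl
    simp [get_neighbours_indeces, get_neighbours_indeces_alt, g1, g2, h4, PySem.List.slice_toNat,
      PySem.List.pyGetD, List.foldl, List.filter, sub_eq_self, List.flatMap, List.take]
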